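-- pv_equiv track=rewrite | github.com/SuryakantKumar/Data-Structures-Algorithms | Miscellaneous Problems/Common-And-NonCommon-Count.py | CommonAndNoncommon
-- ===== SOURCE A (Python) =====
-- def CommonAndNoncommon(x, y):
--     count = 0
--
--     x1 = {}
--     for ele in x:
--         if ele in x1:
--             x1[ele] += 1
--         else:
--             x1[ele] = 1
--
--     y1 = {}
--     for ele in y:
--         if ele in y1:
--             y1[ele] += 1
--         else:
--             y1[ele] = 1
--
--     for e in x1:
--         if e in y1:
--             if x1[e] == y1[e]:
--                 count += x1[e]
--             else:
--                 count += min(x1[e], y1[e])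
--
--     return count
-- ===== SOURCE B (Python) =====
-- def CommonAndNoncommon(x, y):
--     remaining = {}
--     for ele in x:
--         remaining[ele] = remaining.get(ele, 0) + 1
--     count = 0
--     for ele in y:
--         if remaining.get(ele, 0) > 0:
--             count += 1
--             remaining[ele] -= 1
--     return count
-- ===== Notes on version B (the rewrite author's own statement) =====
-- stated objective: simpler
-- what changed: Builds only one frequency dict (for x) and replaces A's second dict plus key-comparison loop by a single streaming pass over y that consumes x's tally, counting each y element whose remaining count is positive.
import Mathlib
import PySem

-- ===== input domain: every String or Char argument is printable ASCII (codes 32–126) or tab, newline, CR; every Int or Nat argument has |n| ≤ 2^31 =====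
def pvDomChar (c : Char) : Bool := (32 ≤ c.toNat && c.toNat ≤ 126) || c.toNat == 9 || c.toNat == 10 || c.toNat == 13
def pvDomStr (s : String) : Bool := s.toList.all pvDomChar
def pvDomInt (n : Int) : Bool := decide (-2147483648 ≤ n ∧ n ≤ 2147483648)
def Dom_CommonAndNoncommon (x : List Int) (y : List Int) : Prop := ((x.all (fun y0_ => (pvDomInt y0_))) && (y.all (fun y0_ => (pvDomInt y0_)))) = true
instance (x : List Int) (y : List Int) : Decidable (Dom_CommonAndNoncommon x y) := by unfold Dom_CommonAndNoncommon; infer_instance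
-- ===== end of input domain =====

-- B replaces A's second frequency dict and its key-comparison loop by one streaming pass
-- over y that consumes x's tally (objective: simpler — one dict instead of two, one combining loop fewer).

-- ===== PORT A =====
-- x1[e] / y1[e] are ported as getD _ 0: exact, since e ranges over x1's keys and the
-- y1 lookup is guarded by `e in y1`.
def CommonAndNoncommon (x : List Int) (y : List Int) : Int :=
  let x1 := x.foldl (fun d ele => if d.contains ele then d.modify ele 0 (· + 1) else d.insert ele 1) PySem.Dict.empty
  let y1 := y.foldl (fun d ele => if d.contains ele then d.modify ele 0 (· + 1) else d.insert ele 1) PySem.Dict.empty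
  x1.keys.foldl (fun count e =>
    if y1.contains e then
      if x1.getD e 0 == y1.getD e 0 then count + x1.getD e 0
      else count + min (x1.getD e 0) (y1.getD e 0)
    else count) 0

-- ===== PORT B =====
-- remaining[ele] -= 1 is ported as insert (overwrite): exact, the key is present since its count is > 0.
def CommonAndNoncommon_alt (x : List Int) (y : List Int) : Int :=
  let remaining := x.foldl (fun d ele => d.insert ele (d.getD ele 0 + 1)) PySem.Dict.empty
  (y.foldl (fun (st : PySem.Dict Int Int × Int) ele =>
      if st.1.getD ele 0 > 0 then (st.1.insert ele (st.1.getD ele 0 - 1), st.2 + 1) else st)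
    (remaining, 0)).2

-- ===== PRECONDITION & SPEC =====
def Spec_CommonAndNoncommon (x : List Int) (y : List Int) (out : Int) : Prop := out = CommonAndNoncommon_alt x y
instance (x : List Int) (y : List Int) (out : Int) : Decidable (Spec_CommonAndNoncommon x y out) := by unfold Spec_CommonAndNoncommon; infer_instance

-- ===== CLAIM (what is proved, stated in full; the proofs are below) =====
def Claim_equal_CommonAndNoncommon : Prop := ∀ (x : List Int) (y : List Int), Dom_CommonAndNoncommon x y → Spec_CommonAndNoncommon x y (CommonAndNoncommon x y)

-- ===== LEMMAS AND PROOFS =====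

-- the common value both programs compute: for each distinct element, the smaller of its two counts
def pvMinCnt (x y : List Int) (k : Int) : Int := min ((x.count k : Int)) ((y.count k : Int))

-- A's if-contains-then-modify-else-insert counting loop is Counter
lemma foldA_eq_counter (x : List Int) :
    x.foldl (fun d ele => if d.contains ele then d.modify ele 0 (· + 1) else d.insert ele 1) PySem.Dict.empty
      = PySem.Dict.counter x := by
  have hstep : (fun (d : PySem.Dict Int Int) ele => if d.contains ele then d.modify ele 0 (· + 1) else d.insert ele 1)
      = (fun d x => d.modify x 0 (· + 1)) := by
    funext d ele
    cases h : d.contains ele with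
    | true => simp
    | false => simp [PySem.Dict.modify, PySem.Dict.getD_of_not_contains (d := d) (k := ele) (d0 := (0:Int)) h]
  rw [hstep, PySem.Dict.counter_eq_foldl]

lemma A_eq_sum (x y : List Int) :
    CommonAndNoncommon x y = ((PySem.Set.ofList x).map (pvMinCnt x y)).sum := by
  unfold CommonAndNoncommon
  rw [foldA_eq_counter, foldA_eq_counter]
  show List.foldl _ 0 (PySem.Dict.counter x).keys = _
  rw [PySem.Dict.keys_counter]
  rw [PySem.List.foldl_congr_mem _ _ (fun c e => c + pvMinCnt x y e) 0 ?_, PySem.List.foldl_add]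
  · simp
  · intro c e he
    have hex : e ∈ x := (PySem.Set.mem_ofList x e).mp he
    by_cases hey : e ∈ y
    · have : (PySem.Dict.counter y).contains e := by
        simp [PySem.Dict.contains_counter, hey]
      simp only [this, if_true, PySem.Dict.getD_counter, pvMinCnt]
      by_cases hcc : ((x.count e : Int)) = ((y.count e : Int))
      · simp [hcc]
      · simp [hcc]
    · have hc : (PySem.Dict.counter y).contains e = false := by
        simp [PySem.Dict.contains_counter, hey]
      have hcy : y.count e = 0 := List.count_eq_zero_of_not_mem hey
      simp only [hc, pvMinCnt, hcy]
      push_cast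
      omega

-- the streaming loop of B, against an arbitrary dict state
lemma stream_eq_sum (l : List Int) (d : PySem.Dict Int Int) (c : Int) (s : List Int)
    (hnd : s.Nodup) (hsub : ∀ k ∈ l, k ∈ s) :
    (l.foldl (fun (st : PySem.Dict Int Int × Int) ele =>
        if st.1.getD ele 0 > 0 then (st.1.insert ele (st.1.getD ele 0 - 1), st.2 + 1) else st) (d, c)).2
      = c + (s.map (fun k => min (max (d.getD k 0) 0) ((l.count k : Int)))).sum := by
  induction l generalizing d c with
  | nil =>
    simp only [List.foldl_nil, List.count_nil, Nat.cast_zero]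
    have : ∀ k ∈ s, min (max (d.getD k 0) 0) (0 : Int) = 0 := by intro k _; omega
    rw [List.sum_eq_zero (by intro v hv; obtain ⟨k, hk, rfl⟩ := List.mem_map.mp hv; exact this k hk)]
    omega
  | cons a l ih =>
    have ha : a ∈ s := hsub a List.mem_cons_self
    have hperm : s.Perm (a :: s.erase a) := List.perm_cons_erase ha
    have hsub' : ∀ k ∈ l, k ∈ s := fun k hk => hsub k (List.mem_cons_of_mem a hk)
    simp only [List.foldl_cons]
    by_cases h : d.getD a 0 > 0
    · rw [if_pos h, ih (d.insert a (d.getD a 0 - 1)) (c + 1) hsub']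
      rw [(hperm.map _).sum_eq, (hperm.map _).sum_eq]
      simp only [List.map_cons, List.sum_cons]
      have herase : (s.erase a).map (fun k => min (max (d.getD k 0) 0) (((a :: l).count k : Int)))
          = (s.erase a).map (fun k => min (max ((d.insert a (d.getD a 0 - 1)).getD k 0) 0) ((l.count k : Int))) := by
        apply List.map_congr_left
        intro k hk
        have hkne : k ≠ a := ((List.Nodup.mem_erase_iff hnd).mp hk).1
        simp [PySem.Dict.getD_insert, hkne, Ne.symm hkne]
      rw [herase]
      rw [List.count_cons_self, PySem.Dict.getD_insert_self]
      push_cast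
      omega
    · rw [if_neg h, ih d c hsub']
      have hmap : s.map (fun k => min (max (d.getD k 0) 0) (((a :: l).count k : Int)))
          = s.map (fun k => min (max (d.getD k 0) 0) ((l.count k : Int))) := by
        apply List.map_congr_left
        intro k _
        by_cases hk : k = a
        · subst hk; rw [List.count_cons_self]; push_cast; omega
        · simp [Ne.symm (show k ≠ a from hk)]
      rw [hmap]

lemma B_eq_sum (x y : List Int) :
    CommonAndNoncommon_alt x y = ((PySem.Set.ofList y).map (pvMinCnt x y)).sum := by
  unfold CommonAndNoncommon_alt
  rw [PySem.Dict.foldl_insert_getD_add_one_eq_counter]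
  show (List.foldl _ (PySem.Dict.counter x, 0) y).2 = _
  rw [stream_eq_sum y _ 0 (PySem.Set.ofList y) (PySem.Set.nodup_ofList y)
      (fun k hk => (PySem.Set.mem_ofList y k).mpr hk)]
  have hmap : (PySem.Set.ofList y).map (fun k => min (max ((PySem.Dict.counter x).getD k 0) 0) ((y.count k : Int)))
      = (PySem.Set.ofList y).map (pvMinCnt x y) := by
    apply List.map_congr_left
    intro k _
    rw [PySem.Dict.getD_counter]
    unfold pvMinCnt
    omega
  rw [hmap]
  omega

-- the per-element minimum vanishes off either list, so summing over x's distinct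
-- elements and over y's gives the same total
lemma sums_agree (x y : List Int) :
    ((PySem.Set.ofList x).map (pvMinCnt x y)).sum = ((PySem.Set.ofList y).map (pvMinCnt x y)).sum := by
  rw [← List.sum_toFinset _ (PySem.Set.nodup_ofList x), ← List.sum_toFinset _ (PySem.Set.nodup_ofList y)]
  have hx : (PySem.Set.ofList x).toFinset.sum (pvMinCnt x y)
      = ((PySem.Set.ofList x).toFinset ∪ (PySem.Set.ofList y).toFinset).sum (pvMinCnt x y) := by
    apply Finset.sum_subset Finset.subset_union_left
    intro k _ hknot
    have : k ∉ x := fun hkx => hknot (List.mem_toFinset.mpr ((PySem.Set.mem_ofList x k).mpr hkx))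
    have hc : x.count k = 0 := List.count_eq_zero_of_not_mem this
    unfold pvMinCnt
    rw [hc]
    push_cast
    omega
  have hy : (PySem.Set.ofList y).toFinset.sum (pvMinCnt x y)
      = ((PySem.Set.ofList x).toFinset ∪ (PySem.Set.ofList y).toFinset).sum (pvMinCnt x y) := by
    apply Finset.sum_subset Finset.subset_union_right
    intro k _ hknot
    have : k ∉ y := fun hky => hknot (List.mem_toFinset.mpr ((PySem.Set.mem_ofList y k).mpr hky))
    have hc : y.count k = 0 := List.count_eq_zero_of_not_mem this
    unfold pvMinCnt
    rw [hc]
    push_cast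
    omega
  rw [hx, hy]

-- ===== VERDICT (by name: the statement is the Claim_ definition above) =====
theorem CommonAndNoncommon_spec : Claim_equal_CommonAndNoncommon := by
  intro x y _
  unfold Spec_CommonAndNoncommon
  rw [A_eq_sum, B_eq_sum, sums_agree]
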